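-- pv_equiv track=rewrite | github.com/qkrrudgns23/mp_public | utils/designer_path_graph.py | normalize_allowed_runway_directions
-- ===== SOURCE A (Python) =====
-- from typing import Any, Dict, List, Optional, Tuple
--
-- def normalize_rw_direction_value(dir_v: Optional[str]) -> str:
--     if dir_v in ("clockwise", "cw"):
--         return "clockwise"
--     if dir_v in ("counter_clockwise", "ccw"):
--         return "counter_clockwise"
--     return "both"
--
-- def normalize_allowed_runway_directions(raw: Any) -> List[str]:
--     out: List[str] = []
--     src = raw if isinstance(raw, list) else []
--     for v in src:
--         d = normalize_rw_direction_value(str(v) if v is not None else "")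
--         if d == "clockwise" and "clockwise" not in out:
--             out.append("clockwise")
--         if d == "counter_clockwise" and "counter_clockwise" not in out:
--             out.append("counter_clockwise")
--     return out
-- ===== SOURCE B (Python) =====
-- from typing import Any, List, Optional
--
--
-- def normalize_allowed_runway_directions(raw: Any) -> List[str]:
--     src = raw if isinstance(raw, list) else []
--
--     def first_index(names) -> Optional[int]:
--         return next((i for i, v in enumerate(src)
--                      if (str(v) if v is not None else "") in names), None)
--
--     i_cw = first_index(("clockwise", "cw"))
--     i_ccw = first_index(("counter_clockwise", "ccw"))
--     if i_cw is None and i_ccw is None: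
--         return []
--     if i_ccw is None:
--         return ["clockwise"]
--     if i_cw is None:
--         return ["counter_clockwise"]
--     if i_cw < i_ccw:
--         return ["clockwise", "counter_clockwise"]
--     return ["counter_clockwise", "clockwise"]
-- ===== Notes on version B (the rewrite author's own statement) =====
-- stated objective: alternative
-- what changed: Replaces the single accumulate-with-inline-dedup loop by two independent find-first-index scans (one per recognized direction) followed by a direct five-way case split on the two optional indices.
import Mathlib
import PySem

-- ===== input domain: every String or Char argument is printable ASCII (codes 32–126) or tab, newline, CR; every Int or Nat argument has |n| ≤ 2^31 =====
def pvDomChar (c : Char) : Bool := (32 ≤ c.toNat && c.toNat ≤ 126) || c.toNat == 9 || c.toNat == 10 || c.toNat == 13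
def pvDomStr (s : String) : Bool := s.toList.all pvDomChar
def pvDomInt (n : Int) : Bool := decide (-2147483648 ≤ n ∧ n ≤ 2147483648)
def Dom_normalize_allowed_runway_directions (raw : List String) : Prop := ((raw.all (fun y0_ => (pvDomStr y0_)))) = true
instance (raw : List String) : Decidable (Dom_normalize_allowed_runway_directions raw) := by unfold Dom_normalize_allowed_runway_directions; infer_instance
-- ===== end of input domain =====

-- B replaces A's accumulate-with-inline-dedup loop by two find-first-index scans and a case
-- split on the two optional indices (alternative decomposition, same value everywhere).

-- ===== PORT A =====
def normalize_rw_direction_value (dir_v : String) : String :=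
  if dir_v = "clockwise" ∨ dir_v = "cw" then "clockwise"
  else if dir_v = "counter_clockwise" ∨ dir_v = "ccw" then "counter_clockwise"
  else "both"

def normalize_allowed_runway_directions (raw : List String) : List String :=
  raw.foldl (fun out v =>
    let d := normalize_rw_direction_value v
    let out1 := if d = "clockwise" ∧ ¬ out.contains "clockwise" then out ++ ["clockwise"] else out
    if d = "counter_clockwise" ∧ ¬ out1.contains "counter_clockwise" then
      out1 ++ ["counter_clockwise"] else out1) []

-- ===== PORT B =====
-- first_index: next((i for i, v in enumerate(src) if v in names), None)
def pvFirstIdx (src : List String) (names : List String) (i : Nat) : Option Nat :=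
  match src with
  | [] => none
  | v :: rest => if names.contains v then some i else pvFirstIdx rest names (i + 1)

def normalize_allowed_runway_directions_alt (raw : List String) : List String :=
  let i_cw := pvFirstIdx raw ["clockwise", "cw"] 0
  let i_ccw := pvFirstIdx raw ["counter_clockwise", "ccw"] 0
  match i_cw, i_ccw with
  | none, none => []
  | some _, none => ["clockwise"]
  | none, some _ => ["counter_clockwise"]
  | some i, some j =>
      if i < j then ["clockwise", "counter_clockwise"]
      else ["counter_clockwise", "clockwise"]

-- ===== PRECONDITION & SPEC =====
def Spec_normalize_allowed_runway_directions (raw : List String) (out : List String) : Prop := out = normalize_allowed_runway_directions_alt raw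
instance (raw : List String) (out : List String) : Decidable (Spec_normalize_allowed_runway_directions raw out) := by unfold Spec_normalize_allowed_runway_directions; infer_instance

-- ===== CLAIM (what is proved, stated in full; the proofs are below) =====
def Claim_equal_normalize_allowed_runway_directions : Prop := ∀ (raw : List String), Dom_normalize_allowed_runway_directions raw → Spec_normalize_allowed_runway_directions raw (normalize_allowed_runway_directions raw)

-- ===== LEMMAS AND PROOFS =====

-- A's loop body, named for the proofs (definitionally the lambda in the port).
def stepA (out : List String) (v : String) : List String :=
  let d := normalize_rw_direction_value v
  let out1 := if d = "clockwise" ∧ ¬ out.contains "clockwise" then out ++ ["clockwise"] else out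
  if d = "counter_clockwise" ∧ ¬ out1.contains "counter_clockwise" then
    out1 ++ ["counter_clockwise"] else out1

theorem A_eq_foldl (raw : List String) :
    normalize_allowed_runway_directions raw = raw.foldl stepA [] := rfl

theorem pvFirstIdx_shift (l names : List String) (i : Nat) :
    pvFirstIdx l names i = (pvFirstIdx l names 0).map (· + i) := by
  induction l generalizing i with
  | nil => rfl
  | cons v r ih =>
    by_cases h : names.contains v = true
    · have h' : v ∈ names := by simpa using h
      simp [pvFirstIdx, h']
    · simp only [pvFirstIdx, h, Bool.false_eq_true, if_false]
      rw [ih (i + 1), ih 1]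
      cases pvFirstIdx r names 0 <;> simp; omega

theorem fold_c_cc (l : List String) :
    l.foldl stepA ["clockwise", "counter_clockwise"] = ["clockwise", "counter_clockwise"] := by
  induction l with
  | nil => rfl
  | cons v r ih =>
    have h : stepA ["clockwise", "counter_clockwise"] v = ["clockwise", "counter_clockwise"] := by
      simp [stepA, normalize_rw_direction_value]
    simpa [h] using ih

theorem fold_cc_c (l : List String) :
    l.foldl stepA ["counter_clockwise", "clockwise"] = ["counter_clockwise", "clockwise"] := by
  induction l with
  | nil => rfl
  | cons v r ih =>
    have h : stepA ["counter_clockwise", "clockwise"] v = ["counter_clockwise", "clockwise"] := by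
      simp [stepA, normalize_rw_direction_value]
    simpa [h] using ih

theorem fold_c (l : List String) :
    l.foldl stepA ["clockwise"] =
      (if (pvFirstIdx l ["counter_clockwise", "ccw"] 0).isSome
       then ["clockwise", "counter_clockwise"] else ["clockwise"]) := by
  induction l with
  | nil => rfl
  | cons v r ih =>
    by_cases h : v = "counter_clockwise" ∨ v = "ccw"
    · have hs : stepA ["clockwise"] v = ["clockwise", "counter_clockwise"] := by
        rcases h with h | h <;> simp [stepA, normalize_rw_direction_value, h]
      simp [List.foldl_cons, hs, fold_c_cc, pvFirstIdx, h]
    · have hs : stepA ["clockwise"] v = ["clockwise"] := by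
        simp [stepA, normalize_rw_direction_value] <;> split_ifs <;> simp_all
      have hn : (["counter_clockwise", "ccw"] : List String).contains v = false := by
        simp; tauto
      simp only [List.foldl_cons, hs, ih, pvFirstIdx, hn, Bool.false_eq_true, if_false]
      rw [pvFirstIdx_shift r _ 1]
      cases pvFirstIdx r ["counter_clockwise", "ccw"] 0 ; all_goals simp

theorem fold_cc (l : List String) :
    l.foldl stepA ["counter_clockwise"] =
      (if (pvFirstIdx l ["clockwise", "cw"] 0).isSome
       then ["counter_clockwise", "clockwise"] else ["counter_clockwise"]) := by
  induction l with
  | nil => rfl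
  | cons v r ih =>
    by_cases h : v = "clockwise" ∨ v = "cw"
    · have hs : stepA ["counter_clockwise"] v = ["counter_clockwise", "clockwise"] := by
        rcases h with h | h <;> simp [stepA, normalize_rw_direction_value, h]
      have hc : (["clockwise", "cw"] : List String).contains v = true := by
        rcases h with h | h <;> simp [h]
      simp [List.foldl_cons, hs, fold_cc_c, pvFirstIdx, h]
    · have hs : stepA ["counter_clockwise"] v = ["counter_clockwise"] := by
        simp [stepA, normalize_rw_direction_value] <;> split_ifs <;> simp_all
      have hn : (["clockwise", "cw"] : List String).contains v = false := by
        simp; tauto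
      simp only [List.foldl_cons, hs, ih, pvFirstIdx, hn, Bool.false_eq_true, if_false]
      rw [pvFirstIdx_shift r _ 1]
      cases pvFirstIdx r ["clockwise", "cw"] 0 ; all_goals simp

theorem fold_nil_eq_alt (l : List String) :
    l.foldl stepA [] = normalize_allowed_runway_directions_alt l := by
  induction l with
  | nil => rfl
  | cons v r ih =>
    by_cases hcw : v = "clockwise" ∨ v = "cw"
    · have hs : stepA [] v = ["clockwise"] := by
        rcases hcw with h | h <;> simp [stepA, normalize_rw_direction_value, h]
      have hc : (["clockwise", "cw"] : List String).contains v = true := by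
        rcases hcw with h | h <;> simp [h]
      have hn : (["counter_clockwise", "ccw"] : List String).contains v = false := by
        rcases hcw with h | h <;> simp [h]
      simp only [List.foldl_cons, hs, fold_c, normalize_allowed_runway_directions_alt,
        pvFirstIdx, hc, hn, if_true, Bool.false_eq_true, if_false]
      rw [pvFirstIdx_shift r _ 1]
      cases pvFirstIdx r ["counter_clockwise", "ccw"] 0 ; all_goals simp
    · by_cases hccw : v = "counter_clockwise" ∨ v = "ccw"
      · have hs : stepA [] v = ["counter_clockwise"] := by
          rcases hccw with h | h <;> simp [stepA, normalize_rw_direction_value, h]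
        have hc : (["counter_clockwise", "ccw"] : List String).contains v = true := by
          rcases hccw with h | h <;> simp [h]
        have hn : (["clockwise", "cw"] : List String).contains v = false := by
          rcases hccw with h | h <;> simp_all
        simp only [List.foldl_cons, hs, fold_cc, normalize_allowed_runway_directions_alt,
          pvFirstIdx, hc, hn, if_true, Bool.false_eq_true, if_false]
        rw [pvFirstIdx_shift r _ 1]
        cases pvFirstIdx r ["clockwise", "cw"] 0 ; all_goals simp
      · have hs : stepA [] v = [] := by
          simp [stepA, normalize_rw_direction_value] <;> split_ifs <;> simp_all
        have hn1 : (["clockwise", "cw"] : List String).contains v = false := by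
          simp; tauto
        have hn2 : (["counter_clockwise", "ccw"] : List String).contains v = false := by
          simp; tauto
        simp only [List.foldl_cons, hs, ih, normalize_allowed_runway_directions_alt,
          pvFirstIdx, hn1, hn2, Bool.false_eq_true, if_false]
        rw [pvFirstIdx_shift r ["clockwise", "cw"] 1,
          pvFirstIdx_shift r ["counter_clockwise", "ccw"] 1]
        cases pvFirstIdx r ["clockwise", "cw"] 0 <;>
          cases pvFirstIdx r ["counter_clockwise", "ccw"] 0 ; all_goals simp

-- ===== VERDICT (by name: the statement is the Claim_ definition above) =====
theorem normalize_allowed_runway_directions_spec : Claim_equal_normalize_allowed_runway_directions := by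
  intro raw _
  unfold Spec_normalize_allowed_runway_directions
  rw [A_eq_foldl, fold_nil_eq_alt]
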